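-- pv_equiv track=rewrite | github.com/acoustic0422/problem_solve | Programmers/210910/자물쇠와 열쇠.py | matchKeyLock
-- ===== SOURCE A (Python) =====
-- import copy
--
-- def checkValid(lock):
--     N = len(lock)
--
--     for i in range(N):
--         for j in range(N):
--             if lock[i][j] != 1:
--                 return False
--     return True
--
-- def matchKeyLock(key, lock):
--     M = len(key)
--     N = len(lock)
--
--     for i in range(-M+1, N+M-1):
--         for j in range(-M+1, N+M-1):
--             temp = copy.deepcopy(lock)
--             for k in range(0, M):
--                 for l in range(0, M):
--                     if 0<= k+i < N and 0 <= l+j < N: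
--                         temp[k+i][l+j] += key[k][l]
--             if checkValid(temp):
--                 return True
--
--     return False
-- ===== SOURCE B (Python) =====
-- def matchKeyLock(key, lock):
--     M = len(key)
--     N = len(lock)
--     # precompute the lock's non-1 cells once; they must all lie under the key window
--     holes = [(r, c) for r in range(N) for c in range(N) if lock[r][c] != 1]
--
--     def fits(i, j):
--         if any(not (0 <= r - i < M and 0 <= c - j < M) for (r, c) in holes):
--             return False
--         # scan only the clipped overlap window, in lock coordinates
--         for r in range(max(i, 0), min(i + M, N)):
--             for c in range(max(j, 0), min(j + M, N)):
--                 if lock[r][c] + key[r - i][c - j] != 1: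
--                     return False
--         return True
--
--     span = range(1 - M, N + M - 1)
--     return any(fits(i, j) for i in span for j in span)
-- ===== Notes on version B (the rewrite author's own statement) =====
-- stated objective: faster
-- what changed: B precomputes the lock's non-1 cells once and, per offset, checks that they are all covered by the key window and scans only the clipped overlap window in lock coordinates, instead of deep-copying the whole lock and rescanning all N*N cells per offset.
-- outside the precondition, e.g. on matchKeyLock([], [[0, 0], [1]]): A returns False, B raises IndexError
import Mathlib
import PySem

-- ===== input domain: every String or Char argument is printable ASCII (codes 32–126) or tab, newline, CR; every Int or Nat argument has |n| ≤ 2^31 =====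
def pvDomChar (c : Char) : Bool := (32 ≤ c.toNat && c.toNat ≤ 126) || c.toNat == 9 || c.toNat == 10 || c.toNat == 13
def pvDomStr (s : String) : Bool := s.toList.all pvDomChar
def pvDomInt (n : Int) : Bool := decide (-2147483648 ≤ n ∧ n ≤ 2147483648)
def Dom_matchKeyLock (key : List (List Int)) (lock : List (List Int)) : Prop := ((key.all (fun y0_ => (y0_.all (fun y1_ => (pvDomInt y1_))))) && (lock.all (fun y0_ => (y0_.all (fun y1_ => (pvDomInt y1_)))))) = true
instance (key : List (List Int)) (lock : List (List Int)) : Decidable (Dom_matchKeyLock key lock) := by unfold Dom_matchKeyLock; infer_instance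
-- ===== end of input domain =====

-- B precomputes the lock's non-1 cells once and, per offset, scans only the clipped
-- overlap window in lock coordinates, instead of A's per-offset deepcopy + full rescan.

-- ===== PORT A =====
-- m[r][c]; exact where both indices are in range (Pre_ keeps every access in range)
def pvGet (m : List (List Int)) (r c : Int) : Int :=
  PySem.List.pyGetD (PySem.List.pyGetD m r []) c 0

-- temp[r][c] += v at nonnegative indices (A calls it only under a guard proving
-- 0 ≤ r and 0 ≤ c, so .toNat at the call sites is exact)
def pvAddAt (t : List (List Int)) (r c : Nat) (v : Int) : List (List Int) :=
  t.modify r (fun row => row.modify c (· + v))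

def checkValid (lock : List (List Int)) : Bool :=
  (PySem.List.pyRange 0 (lock.length : Int) 1).all fun i =>
    (PySem.List.pyRange 0 (lock.length : Int) 1).all fun j =>
      pvGet lock i j == 1

def matchKeyLock (key : List (List Int)) (lock : List (List Int)) : Bool :=
  (PySem.List.pyRange (-(key.length : Int) + 1) ((lock.length : Int) + (key.length : Int) - 1) 1).any fun i =>
    (PySem.List.pyRange (-(key.length : Int) + 1) ((lock.length : Int) + (key.length : Int) - 1) 1).any fun j =>
      checkValid <|
        (PySem.List.pyRange 0 (key.length : Int) 1).foldl (fun t k =>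
          (PySem.List.pyRange 0 (key.length : Int) 1).foldl (fun t l =>
            if 0 ≤ k + i ∧ k + i < (lock.length : Int) ∧ 0 ≤ l + j ∧ l + j < (lock.length : Int) then
              pvAddAt t (k + i).toNat (l + j).toNat (pvGet key k l)
            else t) t) lock

-- ===== PORT B =====
-- B only ever indexes with nonnegative in-range indices, so a Nat getter is exact there
def gcell (m : List (List Int)) (r c : Nat) : Int := (m[r]?.getD [])[c]?.getD 0
def cellAt (m : List (List Int)) (r c : Int) : Int := gcell m r.toNat c.toNat

-- the lock cells that are not already 1 (B precomputes these once)
def holesOf (lock : List (List Int)) : List (Int × Int) :=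
  (PySem.List.pyRange 0 (lock.length : Int) 1).flatMap fun r =>
    (PySem.List.pyRange 0 (lock.length : Int) 1).filterMap fun c =>
      if cellAt lock r c ≠ 1 then some (r, c) else none

def fitsAt (key lock : List (List Int)) (holes : List (Int × Int)) (i j : Int) : Bool :=
  if holes.any (fun rc =>
      !decide (0 ≤ rc.1 - i ∧ rc.1 - i < (key.length : Int) ∧ 0 ≤ rc.2 - j ∧ rc.2 - j < (key.length : Int)))
  then false
  else
    (PySem.List.pyRange (max i 0) (min (i + (key.length : Int)) (lock.length : Int)) 1).all fun r =>
      (PySem.List.pyRange (max j 0) (min (j + (key.length : Int)) (lock.length : Int)) 1).all fun c =>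
        cellAt lock r c + cellAt key (r - i) (c - j) == 1

def matchKeyLock_alt (key : List (List Int)) (lock : List (List Int)) : Bool :=
  let holes := holesOf lock
  let span := PySem.List.pyRange (1 - (key.length : Int)) ((lock.length : Int) + (key.length : Int) - 1) 1
  (span.flatMap fun i => span.map fun j => (i, j)).any fun p =>
    fitsAt key lock holes p.1 p.2

-- ===== PRECONDITION & SPEC =====
-- Pre_ excludes key/lock matrices with a row shorter than len(key) resp. len(lock):
-- on those A raises IndexError on essentially every input (both programs read only the
-- first len(key)/len(lock) columns, so longer rows stay inside Pre_; a ragged key is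
-- also fine when lock = [], since then neither program reads any key cell).
def Pre_matchKeyLock (key : List (List Int)) (lock : List (List Int)) : Prop :=
  ((∀ row ∈ key, key.length ≤ row.length) ∨ lock = []) ∧ (∀ row ∈ lock, lock.length ≤ row.length)
instance (key : List (List Int)) (lock : List (List Int)) : Decidable (Pre_matchKeyLock key lock) := by
  unfold Pre_matchKeyLock; infer_instance

def pvWitness_matchKeyLock : List (List Int) × List (List Int) := ([[0]], [[1]])

def Spec_matchKeyLock (key : List (List Int)) (lock : List (List Int)) (out : Bool) : Prop := out = matchKeyLock_alt key lock
instance (key : List (List Int)) (lock : List (List Int)) (out : Bool) : Decidable (Spec_matchKeyLock key lock out) := by unfold Spec_matchKeyLock; infer_instance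

-- ===== CLAIM (what is proved, stated in full; the proofs are below) =====
def Claim_equal_matchKeyLock : Prop := ∀ (key : List (List Int)) (lock : List (List Int)), Dom_matchKeyLock key lock → Pre_matchKeyLock key lock → Spec_matchKeyLock key lock (matchKeyLock key lock)

-- ===== LEMMAS AND PROOFS =====

def Sq (N : Nat) (t : List (List Int)) : Prop :=
  t.length = N ∧ ∀ r : Nat, r < N → N ≤ (t[r]?.getD []).length

theorem pvGet_eq_gcell (m : List (List Int)) {r c : Int} (hr : 0 ≤ r) (hc : 0 ≤ c) :
    pvGet m r c = gcell m r.toNat c.toNat := by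
  simp [pvGet, gcell, PySem.List.pyGetD, PySem.List.pyGet?_of_nonneg, hr, hc]

theorem gcell_pvAddAt_ne (t : List (List Int)) (a b : Nat) (v : Int) {r c : Nat} (h : r ≠ a ∨ c ≠ b) :
    gcell (pvAddAt t a b v) r c = gcell t r c := by
  unfold gcell pvAddAt
  rcases h with h | h
  · rw [List.getElem?_modify]
    simp [Ne.symm h]
  · rw [List.getElem?_modify]
    rcases heq : t[r]? with _ | row
    · simp
    · by_cases har : a = r <;>
        simp [har, Ne.symm h]

theorem gcell_pvAddAt_self (t : List (List Int)) (a b : Nat) (v : Int)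
    (ha : a < t.length) (hb : b < (t[a]?.getD []).length) :
    gcell (pvAddAt t a b v) a b = gcell t a b + v := by
  unfold gcell pvAddAt
  rw [List.getElem?_modify]
  rcases heq : t[a]? with _ | row
  · simp at heq; omega
  · rw [heq] at hb
    simp only [Option.getD_some] at hb
    simp only [Option.map_eq_map, Option.map_some, if_true, Option.getD_some]
    rw [List.getElem?_modify, List.getElem?_eq_getElem hb]
    simp

theorem sq_pvAddAt {N : Nat} {t : List (List Int)} (ht : Sq N t) (a b : Nat) (v : Int) :
    Sq N (pvAddAt t a b v) := by
  obtain ⟨hlen, hrow⟩ := ht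
  refine ⟨by simp [pvAddAt, hlen], fun r hr => ?_⟩
  unfold pvAddAt
  rw [List.getElem?_modify]
  rcases heq : t[r]? with _ | row
  · simpa [heq] using hrow r hr
  · have := hrow r hr; rw [heq] at this
    by_cases har : a = r <;> simp [har] <;> simpa using this

theorem sq_foldl {N : Nat} {β : Type} (step : List (List Int) → β → List (List Int))
    (hstep : ∀ t x, Sq N t → Sq N (step t x)) (l : List β) {t : List (List Int)} (ht : Sq N t) :
    Sq N (l.foldl step t) := by
  induction l generalizing t with
  | nil => exact ht
  | cons x xs ih => exact ih (hstep t x ht)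

theorem inner_char (key : List (List Int)) (N : Nat) (i j k : Int) (n : Nat)
    {t : List (List Int)} (ht : Sq N t) (r c : Nat) (hr : r < N) (hc : c < N) :
    gcell ((List.range n).foldl (fun t (l : Nat) =>
        if 0 ≤ k + i ∧ k + i < (N:Int) ∧ 0 ≤ (l:Int) + j ∧ (l:Int) + j < (N:Int) then
          pvAddAt t (k + i).toNat ((l:Int) + j).toNat (pvGet key k (l:Int)) else t) t) r c
      = gcell t r c +
        (if (r:Int) = k + i ∧ j ≤ (c:Int) ∧ (c:Int) < j + n then pvGet key k ((c:Int) - j) else 0) := by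
  induction n with
  | zero => simp
  | succ n ih =>
    have hsq : Sq N ((List.range n).foldl (fun t (l : Nat) =>
        if 0 ≤ k + i ∧ k + i < (N:Int) ∧ 0 ≤ (l:Int) + j ∧ (l:Int) + j < (N:Int) then
          pvAddAt t (k + i).toNat ((l:Int) + j).toNat (pvGet key k (l:Int)) else t) t) := by
      refine sq_foldl _ (fun t x htt => ?_) _ ht
      dsimp only
      split
      · exact sq_pvAddAt htt _ _ _
      · exact htt
    rw [List.range_succ, List.foldl_append, List.foldl_cons, List.foldl_nil]
    by_cases hg : 0 ≤ k + i ∧ k + i < (N:Int) ∧ 0 ≤ (n:Int) + j ∧ (n:Int) + j < (N:Int)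
    · rw [if_pos hg]
      by_cases hrc : r = (k + i).toNat ∧ c = ((n:Int) + j).toNat
      · obtain ⟨hr1, hc1⟩ := hrc
        subst hr1; subst hc1
        rw [gcell_pvAddAt_self _ _ _ _ (by rw [hsq.1]; omega)
          (by have := hsq.2 ((k + i).toNat) (by omega); omega)]
        rw [ih]
        have h1 : ¬ (((k + i).toNat : Int) = k + i ∧ j ≤ ((((n:Int) + j).toNat : Nat) : Int) ∧ ((((n:Int) + j).toNat : Nat) : Int) < j + n) := by omega
        have h2 : (((k + i).toNat : Int) = k + i ∧ j ≤ ((((n:Int) + j).toNat : Nat) : Int) ∧ ((((n:Int) + j).toNat : Nat) : Int) < j + (n + 1 : Nat)) := by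
          push_cast; omega
        rw [if_neg h1, if_pos h2]
        have h3 : ((((n:Int) + j).toNat : Nat) : Int) - j = (n : Int) := by omega
        rw [h3]
        ring
      · rw [gcell_pvAddAt_ne _ _ _ _ (by omega), ih]
        congr 1
        exact if_congr (by push_cast; omega) rfl rfl
    · rw [if_neg hg, ih]
      congr 1
      exact if_congr (by push_cast; omega) rfl rfl

theorem outer_char (key : List (List Int)) (N : Nat) (i j : Int) (m : Nat)
    {t : List (List Int)} (ht : Sq N t) (r c : Nat) (hr : r < N) (hc : c < N) :
    gcell ((List.range m).foldl (fun t (k : Nat) =>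
        (List.range key.length).foldl (fun t (l : Nat) =>
          if 0 ≤ (k:Int) + i ∧ (k:Int) + i < (N:Int) ∧ 0 ≤ (l:Int) + j ∧ (l:Int) + j < (N:Int) then
            pvAddAt t ((k:Int) + i).toNat ((l:Int) + j).toNat (pvGet key (k:Int) (l:Int)) else t) t) t) r c
      = gcell t r c +
        (if i ≤ (r:Int) ∧ (r:Int) < i + m ∧ j ≤ (c:Int) ∧ (c:Int) < j + (key.length:Int)
         then pvGet key ((r:Int) - i) ((c:Int) - j) else 0) := by
  induction m with
  | zero =>
    simp only [List.range_zero, List.foldl_nil, Nat.cast_zero, add_zero]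
    rw [if_neg (by omega)]
    simp
  | succ m ih =>
    have hsq : Sq N ((List.range m).foldl (fun t (k : Nat) =>
        (List.range key.length).foldl (fun t (l : Nat) =>
          if 0 ≤ (k:Int) + i ∧ (k:Int) + i < (N:Int) ∧ 0 ≤ (l:Int) + j ∧ (l:Int) + j < (N:Int) then
            pvAddAt t ((k:Int) + i).toNat ((l:Int) + j).toNat (pvGet key (k:Int) (l:Int)) else t) t) t) := by
      refine sq_foldl _ (fun t k htt => ?_) _ ht
      refine sq_foldl _ (fun t l htt => ?_) _ htt
      dsimp only
      split
      · exact sq_pvAddAt htt _ _ _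
      · exact htt
    rw [List.range_succ, List.foldl_append, List.foldl_cons, List.foldl_nil]
    rw [inner_char key N i j (m:Int) key.length hsq r c hr hc, ih]
    by_cases hwin : (r:Int) = (m:Int) + i ∧ j ≤ (c:Int) ∧ (c:Int) < j + (key.length:Int)
    · rw [if_pos hwin]
      rw [if_neg (show ¬ (i ≤ (r:Int) ∧ (r:Int) < i + (m:Int) ∧ j ≤ (c:Int) ∧ (c:Int) < j + (key.length:Int)) by omega)]
      rw [if_pos (show i ≤ (r:Int) ∧ (r:Int) < i + ((m+1:Nat):Int) ∧ j ≤ (c:Int) ∧ (c:Int) < j + (key.length:Int) by push_cast; omega)]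
      have hmi : (r:Int) - i = (m:Int) := by omega
      rw [hmi]
      ring
    · rw [if_neg hwin, add_zero]
      congr 1
      exact if_congr (by push_cast; omega) rfl rfl

theorem checkValid_iff (t : List (List Int)) :
    checkValid t = true ↔ ∀ r c : Nat, r < t.length → c < t.length → gcell t r c = 1 := by
  simp only [checkValid, List.all_eq_true, PySem.List.mem_pyRange_one, beq_iff_eq]
  constructor
  · intro h r c hr hc
    have := h (r:Int) ⟨by omega, by omega⟩ (c:Int) ⟨by omega, by omega⟩
    rwa [pvGet_eq_gcell _ (by omega) (by omega), Int.toNat_natCast, Int.toNat_natCast] at this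
  · intro h i hi j hj
    rw [pvGet_eq_gcell _ hi.1 hj.1]
    exact h _ _ (by omega) (by omega)

theorem mem_holesOf (lock : List (List Int)) (r c : Int) :
    (r, c) ∈ holesOf lock ↔
      0 ≤ r ∧ r < (lock.length:Int) ∧ 0 ≤ c ∧ c < (lock.length:Int) ∧ gcell lock r.toNat c.toNat ≠ 1 := by
  simp only [holesOf, List.mem_flatMap, List.mem_filterMap, PySem.List.mem_pyRange_one]
  constructor
  · rintro ⟨r', hr', c', hc', hif⟩
    by_cases hne : cellAt lock r' c' ≠ 1
    · rw [if_pos hne] at hif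
      obtain ⟨rfl, rfl⟩ : r' = r ∧ c' = c := by
        simpa [Prod.ext_iff] using hif
      exact ⟨hr'.1, hr'.2, hc'.1, hc'.2, hne⟩
    · rw [if_neg hne] at hif; cases hif
  · rintro ⟨h1, h2, h3, h4, h5⟩
    exact ⟨r, ⟨h1, h2⟩, c, ⟨h3, h4⟩, by simp only [cellAt]; rw [if_pos h5]⟩

theorem sq_of_rows (t : List (List Int)) (h : ∀ row ∈ t, t.length ≤ row.length) : Sq t.length t := by
  refine ⟨rfl, fun r hr => ?_⟩
  rw [List.getElem?_eq_getElem hr]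
  exact h _ (List.getElem_mem hr)

theorem offset_eq (key lock : List (List Int))
    (hlock : ∀ row ∈ lock, lock.length ≤ row.length) (i j : Int) :
    checkValid ((PySem.List.pyRange 0 (key.length:Int) 1).foldl (fun t k =>
        (PySem.List.pyRange 0 (key.length:Int) 1).foldl (fun t l =>
          if 0 ≤ k + i ∧ k + i < (lock.length:Int) ∧ 0 ≤ l + j ∧ l + j < (lock.length:Int) then
            pvAddAt t (k + i).toNat (l + j).toNat (pvGet key k l)
          else t) t) lock)
    = fitsAt key lock (holesOf lock) i j := by
  have hsqlock : Sq lock.length lock := sq_of_rows lock hlock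
  have hsqt : Sq lock.length ((PySem.List.pyRange 0 (key.length:Int) 1).foldl (fun t k =>
        (PySem.List.pyRange 0 (key.length:Int) 1).foldl (fun t l =>
          if 0 ≤ k + i ∧ k + i < (lock.length:Int) ∧ 0 ≤ l + j ∧ l + j < (lock.length:Int) then
            pvAddAt t (k + i).toNat (l + j).toNat (pvGet key k l)
          else t) t) lock) := by
    refine sq_foldl _ (fun t k htt => ?_) _ hsqlock
    refine sq_foldl _ (fun t l htt => ?_) _ htt
    dsimp only
    split
    · exact sq_pvAddAt htt _ _ _
    · exact htt
  have htempg : ∀ r c : Nat, r < lock.length → c < lock.length →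
      gcell ((PySem.List.pyRange 0 (key.length:Int) 1).foldl (fun t k =>
        (PySem.List.pyRange 0 (key.length:Int) 1).foldl (fun t l =>
          if 0 ≤ k + i ∧ k + i < (lock.length:Int) ∧ 0 ≤ l + j ∧ l + j < (lock.length:Int) then
            pvAddAt t (k + i).toNat (l + j).toNat (pvGet key k l)
          else t) t) lock) r c
      = gcell lock r c +
        (if i ≤ (r:Int) ∧ (r:Int) < i + (key.length:Int) ∧ j ≤ (c:Int) ∧ (c:Int) < j + (key.length:Int)
         then pvGet key ((r:Int) - i) ((c:Int) - j) else 0) := by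
    intro r c hr hc
    rw [show ((PySem.List.pyRange 0 (key.length:Int) 1).foldl (fun t k =>
        (PySem.List.pyRange 0 (key.length:Int) 1).foldl (fun t l =>
          if 0 ≤ k + i ∧ k + i < (lock.length:Int) ∧ 0 ≤ l + j ∧ l + j < (lock.length:Int) then
            pvAddAt t (k + i).toNat (l + j).toNat (pvGet key k l)
          else t) t) lock)
      = ((List.range key.length).foldl (fun t (k : Nat) =>
        (List.range key.length).foldl (fun t (l : Nat) =>
          if 0 ≤ (k:Int) + i ∧ (k:Int) + i < (lock.length:Int) ∧ 0 ≤ (l:Int) + j ∧ (l:Int) + j < (lock.length:Int) then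
            pvAddAt t ((k:Int) + i).toNat ((l:Int) + j).toNat (pvGet key (k:Int) (l:Int)) else t) t) lock)
      from by simp only [PySem.List.pyRange_zero_natCast, List.foldl_map]]
    exact outer_char key lock.length i j key.length hsqlock r c hr hc
  have hfits : fitsAt key lock (holesOf lock) i j =
      (((holesOf lock).all fun rc =>
        decide (0 ≤ rc.1 - i ∧ rc.1 - i < (key.length:Int) ∧ 0 ≤ rc.2 - j ∧ rc.2 - j < (key.length:Int))) &&
      ((PySem.List.pyRange (max i 0) (min (i + (key.length:Int)) (lock.length:Int)) 1).all fun r =>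
        (PySem.List.pyRange (max j 0) (min (j + (key.length:Int)) (lock.length:Int)) 1).all fun c =>
          cellAt lock r c + cellAt key (r - i) (c - j) == 1)) := by
    unfold fitsAt
    rw [show ((holesOf lock).any fun rc =>
        !decide (0 ≤ rc.1 - i ∧ rc.1 - i < (key.length:Int) ∧ 0 ≤ rc.2 - j ∧ rc.2 - j < (key.length:Int)))
      = !((holesOf lock).all fun rc =>
        decide (0 ≤ rc.1 - i ∧ rc.1 - i < (key.length:Int) ∧ 0 ≤ rc.2 - j ∧ rc.2 - j < (key.length:Int)))
      from by rw [List.any_eq_not_all_not]; simp]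
    cases ((holesOf lock).all fun rc =>
        decide (0 ≤ rc.1 - i ∧ rc.1 - i < (key.length:Int) ∧ 0 ≤ rc.2 - j ∧ rc.2 - j < (key.length:Int))) <;> simp
  rw [hfits, Bool.eq_iff_iff, checkValid_iff, hsqt.1]
  simp only [Bool.and_eq_true, List.all_eq_true, decide_eq_true_eq, PySem.List.mem_pyRange_one,
    beq_iff_eq]
  constructor
  · intro hA
    refine ⟨?_, ?_⟩
    · rintro ⟨r, c⟩ hmem
      rw [mem_holesOf] at hmem
      obtain ⟨h1, h2, h3, h4, h5⟩ := hmem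
      have hP := hA r.toNat c.toNat (by omega) (by omega)
      rw [htempg _ _ (by omega) (by omega)] at hP
      by_contra hnw
      rw [if_neg (by omega), add_zero] at hP
      exact h5 hP
    · intro r hr c hc
      have hr0 : 0 ≤ r := le_trans (le_max_right i 0) hr.1
      have hc0 : 0 ≤ c := le_trans (le_max_right j 0) hc.1
      have hP := hA r.toNat c.toNat (by omega) (by omega)
      rw [htempg _ _ (by omega) (by omega), if_pos (by omega)] at hP
      rw [show ((r.toNat:Nat):Int) = r by omega, show ((c.toNat:Nat):Int) = c by omega] at hP
      rw [cellAt, cellAt, ← pvGet_eq_gcell key (by omega) (by omega)]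
      exact hP
  · rintro ⟨hcov, hwin⟩ r c hr hc
    rw [htempg _ _ hr hc]
    by_cases hw : i ≤ (r:Int) ∧ (r:Int) < i + (key.length:Int) ∧ j ≤ (c:Int) ∧ (c:Int) < j + (key.length:Int)
    · rw [if_pos hw]
      have hv := hwin (r:Int) ⟨by omega, by omega⟩ (c:Int) ⟨by omega, by omega⟩
      rw [cellAt, cellAt, ← pvGet_eq_gcell key (by omega) (by omega),
        Int.toNat_natCast, Int.toNat_natCast] at hv
      exact hv
    · rw [if_neg hw, add_zero]
      by_contra hne
      have hmem : ((r:Int), (c:Int)) ∈ holesOf lock := by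
        rw [mem_holesOf]
        exact ⟨by omega, by omega, by omega, by omega,
          by rw [Int.toNat_natCast, Int.toNat_natCast]; exact hne⟩
      have := hcov _ hmem
      dsimp only at this
      exact hw (by omega)

theorem any_pair_flatMap {α : Type} (l : List α) (f : α → α → Bool) :
    ((l.flatMap fun i => l.map fun j => (i, j)).any fun p => f p.1 p.2)
      = (l.any fun i => l.any fun j => f i j) := by
  rw [Bool.eq_iff_iff]
  simp only [List.any_eq_true, List.mem_flatMap, List.mem_map]
  constructor
  · rintro ⟨p, ⟨i, hi, j, hj, rfl⟩, hf⟩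
    exact ⟨i, hi, j, hj, hf⟩
  · rintro ⟨i, hi, j, hj, hf⟩
    exact ⟨(i, j), ⟨i, hi, j, hj, rfl⟩, hf⟩

theorem main_eq (key lock : List (List Int))
    (hlock : ∀ row ∈ lock, lock.length ≤ row.length) :
    matchKeyLock key lock = matchKeyLock_alt key lock := by
  unfold matchKeyLock matchKeyLock_alt
  rw [any_pair_flatMap]
  rw [show (1 - (key.length : Int)) = (-(key.length : Int) + 1) by ring]
  exact congrArg _ (funext fun i => congrArg _ (funext fun j => offset_eq key lock hlock i j))

-- ===== VERDICT (by name: the statement is the Claim_ definition above) =====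
theorem matchKeyLock_spec : Claim_equal_matchKeyLock := by
  intro key lock _ hpre
  unfold Spec_matchKeyLock
  exact main_eq key lock hpre.2
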